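-- pv_equiv track=rewrite | github.com/Project-CETI/whale-tag-v3-firmware | tools/trace_to_flamegraph.py | resolve_address
-- ===== SOURCE A (Python) =====
-- def resolve_address(symbols, addr):
--     """Binary search for the symbol whose start address is <= addr."""
--     lo, hi = 0, len(symbols) - 1
--     while lo <= hi:
--         mid = (lo + hi) // 2
--         if symbols[mid][0] <= addr:
--             lo = mid + 1
--         else:
--             hi = mid - 1
--     if hi < 0:
--         return f"0x{addr:08x}"
--     return symbols[hi][1]
-- ===== SOURCE B (Python) =====
-- def resolve_address(symbols, addr):
--     """Linear prefix scan: track the last symbol whose start address is <= addr,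
--     stopping at the first start address beyond addr (symbols sorted ascending)."""
--     found = -1
--     for i, sym in enumerate(symbols):
--         if sym[0] <= addr:
--             found = i
--         else:
--             break
--     if found < 0:
--         return f"0x{addr:08x}"
--     return symbols[found][1]
-- ===== Notes on version B (the rewrite author's own statement) =====
-- stated objective: simpler
-- what changed: Replaced the binary-search loop over index bounds with a single linear forward scan that tracks the last symbol whose start address is <= addr and stops at the first start beyond addr.
-- outside the precondition, e.g. on resolve_address([(9, 'a'), (0, 'b'), (1, 'c')], 1): A returns 'c', B returns '0x00000001'
import Mathlib
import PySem

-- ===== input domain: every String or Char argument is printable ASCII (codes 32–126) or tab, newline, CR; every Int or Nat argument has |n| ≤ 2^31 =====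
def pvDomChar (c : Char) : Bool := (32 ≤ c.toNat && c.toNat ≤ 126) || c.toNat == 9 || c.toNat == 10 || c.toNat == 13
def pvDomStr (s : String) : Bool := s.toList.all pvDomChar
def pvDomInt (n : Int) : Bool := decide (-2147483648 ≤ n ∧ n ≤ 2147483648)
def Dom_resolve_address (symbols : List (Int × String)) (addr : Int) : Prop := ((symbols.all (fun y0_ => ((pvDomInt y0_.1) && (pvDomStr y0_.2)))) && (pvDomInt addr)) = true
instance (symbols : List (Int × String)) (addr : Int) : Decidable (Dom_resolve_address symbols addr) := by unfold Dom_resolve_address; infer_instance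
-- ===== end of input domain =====

-- B replaces the binary search with a linear prefix scan (simpler); equivalence is proved
-- on tables where the starts ≤ addr form a prefix (in particular every sorted table).

-- f"0x{addr:08x}": hand-ported (PySem has no hex format); exact for every Int
-- (Nat.toDigits 16 yields lowercase hex digits; zfill pads to width 8 keeping the sign in front).
def pyHex08 (n : Int) : String :=
  "0x" ++ PySem.Str.zfill
    (String.ofList ((if n < 0 then ['-'] else []) ++ Nat.toDigits 16 n.natAbs)) 8

-- ===== PORT A =====
-- the while loop of A; symbols[mid] is provably in range (0 ≤ lo ≤ mid ≤ hi < len), so pyGetD is exact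
def raLoop (symbols : List (Int × String)) (addr lo hi : Int) : Int :=
  if _h : lo ≤ hi then
    let mid := PySem.Int.floordiv (lo + hi) 2
    if (PySem.List.pyGetD symbols mid (0, "")).1 ≤ addr then
      raLoop symbols addr (mid + 1) hi
    else
      raLoop symbols addr lo (mid - 1)
  else hi
termination_by (hi + 1 - lo).toNat
decreasing_by
  · have := PySem.Int.floordiv_two_mid_bounds _h; omega
  · have := PySem.Int.floordiv_two_mid_bounds _h; omega

def resolve_address (symbols : List (Int × String)) (addr : Int) : String :=
  let hi := raLoop symbols addr 0 ((symbols.length : Int) - 1)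
  if hi < 0 then pyHex08 addr
  else (PySem.List.pyGetD symbols hi (0, "")).2   -- hi provably in range here

-- ===== PORT B =====
-- the for loop of B: scan forward, remember the last index whose start ≤ addr, break at the first beyond
def raScan (addr : Int) : List (Int × String) → Int → Int → Int
  | [], _, found => found
  | p :: rest, i, found => if p.1 ≤ addr then raScan addr rest (i + 1) i else found

def resolve_address_alt (symbols : List (Int × String)) (addr : Int) : String :=
  let found := raScan addr symbols 0 (-1)
  if found < 0 then pyHex08 addr
  else (PySem.List.pyGetD symbols found (0, "")).2   -- found provably in range here

-- ===== PRECONDITION & SPEC =====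
-- Pre_ excludes tables where a start address ≤ addr appears after one > addr, i.e. tables not
-- sorted around addr: binary search assumes a sorted table (its docstring), and on such inputs its
-- answer is an artefact of the probe sequence (both A's and B's values are equally accidental).
def Pre_resolve_address (symbols : List (Int × String)) (addr : Int) : Prop :=
  symbols.Pairwise (fun a b => b.1 ≤ addr → a.1 ≤ addr)
instance (symbols : List (Int × String)) (addr : Int) : Decidable (Pre_resolve_address symbols addr) := by
  unfold Pre_resolve_address; infer_instance

def pvWitness_resolve_address : (List (Int × String)) × Int := ([(0, "start"), (4, "main"), (9, "end")], 5)

def Spec_resolve_address (symbols : List (Int × String)) (addr : Int) (out : String) : Prop := out = resolve_address_alt symbols addr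
instance (symbols : List (Int × String)) (addr : Int) (out : String) : Decidable (Spec_resolve_address symbols addr out) := by unfold Spec_resolve_address; infer_instance

-- ===== CLAIM (what is proved, stated in full; the proofs are below) =====
def Claim_equal_resolve_address : Prop := ∀ (symbols : List (Int × String)) (addr : Int), Dom_resolve_address symbols addr → Pre_resolve_address symbols addr → Spec_resolve_address symbols addr (resolve_address symbols addr)

-- ===== LEMMAS AND PROOFS =====

-- Under Pre_ the predicate 'start ≤ addr' holds exactly on a prefix of length k.
theorem ra_prefix_k (symbols : List (Int × String)) (addr : Int)
    (h : symbols.Pairwise (fun a b => b.1 ≤ addr → a.1 ≤ addr)) :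
    ∃ k : Nat, k ≤ symbols.length ∧
      ∀ i (hi : i < symbols.length), (symbols[i].1 ≤ addr ↔ i < k) := by
  induction symbols with
  | nil => exact ⟨0, by simp⟩
  | cons p l ih =>
    rcases List.pairwise_cons.mp h with ⟨hp, hl⟩
    by_cases hpa : p.1 ≤ addr
    · obtain ⟨k, hk, hc⟩ := ih hl
      refine ⟨k + 1, by simpa using hk, ?_⟩
      intro i hi
      cases i with
      | zero => simpa using hpa
      | succ j =>
        have := hc j (by simpa using hi)
        simpa [Nat.succ_lt_succ_iff] using this
    · refine ⟨0, Nat.zero_le _, ?_⟩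
      intro i hi
      cases i with
      | zero => simpa using hpa
      | succ j =>
        have hj : j < l.length := by simpa using hi
        simp only [List.getElem_cons_succ]
        have hmem : l[j] ∈ l := List.getElem_mem hj
        have := hp _ hmem
        constructor
        · intro hle; exact absurd (this hle) hpa
        · omega

-- A's loop returns k - 1 whenever [lo, hi] brackets the prefix boundary.
theorem raLoop_eq (symbols : List (Int × String)) (addr : Int) (k : Nat)
    (hk : k ≤ symbols.length)
    (hc : ∀ i (hi : i < symbols.length), (symbols[i].1 ≤ addr ↔ i < k)) :
    ∀ n (lo hi : Int), (hi + 1 - lo).toNat = n →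
      0 ≤ lo → lo ≤ (k : Int) → (k : Int) - 1 ≤ hi → hi ≤ (symbols.length : Int) - 1 →
      raLoop symbols addr lo hi = (k : Int) - 1 := by
  intro n
  induction n using Nat.strong_induction_on with
  | _ n ih =>
    intro lo hi hn hlo0 hlok hkhi hihi
    rw [raLoop]
    by_cases h : lo ≤ hi
    · simp only [h, dif_pos]
      have hmid := PySem.Int.floordiv_two_mid_bounds h
      set mid := PySem.Int.floordiv (lo + hi) 2 with hmiddef
      have hmid0 : 0 ≤ mid := le_trans hlo0 hmid.1
      have hmidlen : mid < (symbols.length : Int) := by omega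
      have hget : PySem.List.pyGetD symbols mid (0, "") = symbols[mid.toNat] :=
        PySem.List.pyGetD_eq_getElem symbols (0, "") hmid0 hmidlen
      have hmidn : mid.toNat < symbols.length := by omega
      have hchar := hc mid.toNat hmidn
      by_cases hpred : (PySem.List.pyGetD symbols mid (0, "")).1 ≤ addr
      · simp only [hpred, if_pos]
        have : mid.toNat < k := hchar.mp (by rw [hget] at hpred; exact hpred)
        exact ih _ (by omega) (mid + 1) hi rfl (by omega) (by omega) hkhi hihi
      · simp only [hpred, if_neg, not_false_iff]
        have : ¬ mid.toNat < k := fun hlt => hpred (by rw [hget]; exact hchar.mpr hlt)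
        exact ih _ (by omega) lo (mid - 1) rfl hlo0 hlok (by omega) (by omega)
    · simp only [h, dif_neg, not_false_iff]
      omega

-- B's scan returns k - 1: generalized over the suffix being scanned.
theorem raScan_eq' (addr : Int) (k : Nat) :
    ∀ (l : List (Int × String)) (start : Nat),
      k ≤ start + l.length →
      (∀ j (hj : j < l.length), (l[j].1 ≤ addr ↔ start + j < k)) →
      raScan addr l (start : Int) (((min k start : Nat) : Int) - 1) = (k : Int) - 1 := by
  intro l
  induction l with
  | nil =>
    intro start hle _
    simp only [raScan]
    have hle' : k ≤ start := by simpa using hle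
    have : min k start = k := by omega
    rw [this]
  | cons p rest ih =>
    intro start hle hc
    simp only [raScan]
    by_cases hp : p.1 ≤ addr
    · simp only [hp, if_pos]
      have h0 : start < k := (hc 0 (by simp)).mp (by simpa using hp)
      have := ih (start + 1) (by simpa [Nat.add_assoc, Nat.add_comm 1 rest.length] using hle)
        (fun j hj => by
          have := hc (j + 1) (by simpa using hj)
          simpa [Nat.add_assoc, Nat.add_comm 1 j] using this)
      have hmin : ((min k (start + 1) : Nat) : Int) - 1 = (start : Int) := by omega
      rw [hmin] at this
      push_cast at this
      exact this
    · simp only [hp, if_neg, not_false_iff]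
      have h0 : ¬ start < k := fun hlt => hp ((hc 0 (by simp)).mpr (by simpa using hlt))
      have : min k start = k := by omega
      rw [this]

-- ===== VERDICT (by name: the statement is the Claim_ definition above) =====
theorem resolve_address_spec : Claim_equal_resolve_address := by
  intro symbols addr _hdom hpre
  unfold Spec_resolve_address
  obtain ⟨k, hk, hc⟩ := ra_prefix_k symbols addr hpre
  have hA : raLoop symbols addr 0 ((symbols.length : Int) - 1) = (k : Int) - 1 := by
    refine raLoop_eq symbols addr k hk hc _ 0 _ rfl (le_refl 0) (by omega) (by omega) (by omega)
  have hB : raScan addr symbols 0 (-1) = (k : Int) - 1 := by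
    have := raScan_eq' addr k symbols 0 (by simpa using hk) (fun j hj => by simpa using hc j hj)
    simpa using this
  unfold resolve_address resolve_address_alt
  rw [hA, hB]
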